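-- pv_equiv track=rewrite | github.com/fjtkfm/nlp-100-knock | chap1/q06.py | make_char_n_gram
-- ===== SOURCE A (Python) =====
-- def make_char_n_gram(target, n):
-- 	result = []
-- 	for index in range(len(target)):
-- 		word = target[index:index + n]
-- 		if len(word) < n:
-- 			word += ' ' * (n - len(word))
-- 		result.append(word)
-- 	return result
-- ===== SOURCE B (Python) =====
-- def make_char_n_gram(target, n):
--     # Reverse-order sliding-window pass: each gram is its successor shifted
--     # by one (drop the successor's last char, prepend the current char);
--     # the virtual gram past the end is all spaces.  No slicing of target.
--     if n <= 0:
--         return [''] * len(target)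
--     grams = []
--     window = ' ' * (n - 1)
--     for ch in reversed(target):
--         gram = ch + window
--         grams.append(gram)
--         window = gram[:-1]
--     grams.reverse()
--     return grams
-- ===== Notes on version B (the rewrite author's own statement) =====
-- stated objective: alternative
-- what changed: B replaces A's per-index slice-and-pad loop by a single reverse-order sliding-window pass: each gram is built from the following gram (prepend the current character, drop the successor's last character), with an all-space virtual gram past the end; target is never sliced.
-- intended difference: For n < 0 with -n < len(target), A returns wraparound slices target[i:i+n] via Python's negative-stop slicing rule -- an accident of slicing, not an n-gram; B returns the degenerate all-empty grams, consistent with n = 0 and with A's own value whenever the string is no longer than -n. — e.g. on make_char_n_gram("ab", -1): A returns ["a", ""], B returns ["", ""]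
import Mathlib
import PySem

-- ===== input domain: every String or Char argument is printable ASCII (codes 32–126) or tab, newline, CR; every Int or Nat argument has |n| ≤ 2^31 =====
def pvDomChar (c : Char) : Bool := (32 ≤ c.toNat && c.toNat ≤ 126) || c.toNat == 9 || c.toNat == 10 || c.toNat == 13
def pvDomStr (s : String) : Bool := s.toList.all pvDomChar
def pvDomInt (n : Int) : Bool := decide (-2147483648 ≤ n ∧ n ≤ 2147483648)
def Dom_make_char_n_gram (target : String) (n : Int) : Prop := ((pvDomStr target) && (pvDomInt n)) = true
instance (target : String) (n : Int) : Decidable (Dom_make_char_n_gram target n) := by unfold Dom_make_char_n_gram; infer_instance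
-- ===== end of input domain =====

-- B builds the grams in one reverse-order sliding-window pass (each gram = current char
-- prepended to the following gram minus its last char); return values only, no mutation.

-- ===== PORT A =====
def make_char_n_gram (target : String) (n : Int) : List String :=
  (PySem.List.pyRange 0 (PySem.Str.len target) 1).foldl
    (fun result index =>
      let word := PySem.List.slice target.toList (some index) (some (index + n))
      let word := if (word.length : Int) < n
                  then word ++ List.replicate (n - (word.length : Int)).toNat ' '
                  else word
      result ++ [String.ofList word]) []

-- ===== PORT B =====
-- gram[:-1] on the always-nonempty gram is List.dropLast (PySem.List.slice_to_neg_one)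
def make_char_n_gram_alt (target : String) (n : Int) : List String :=
  if n ≤ 0 then List.replicate target.toList.length "" else
  let st := target.toList.reverse.foldl
    (fun (st : List Char × List String) ch =>
      let gram := ch :: st.1
      (gram.dropLast, st.2 ++ [String.ofList gram]))
    (List.replicate (n - 1).toNat ' ', [])
  st.2.reverse

-- ===== PRECONDITION & SPEC =====
-- For n < 0 with -n < len(target), A returns wraparound slices target[i:i+n] via Python's
-- negative-stop slicing rule (an accident of slicing, not an n-gram); B returns the degenerate
-- all-empty grams, consistent with n = 0 and with A's own value whenever len(target) ≤ -n.
def D_make_char_n_gram (target : String) (n : Int) : Prop :=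
  n < 0 ∧ -n < (target.toList.length : Int)
instance (target : String) (n : Int) : Decidable (D_make_char_n_gram target n) := by
  unfold D_make_char_n_gram; infer_instance
def Spec_make_char_n_gram (target : String) (n : Int) (out : List String) : Prop :=
  ¬ D_make_char_n_gram target n → out = make_char_n_gram_alt target n
instance (target : String) (n : Int) (out : List String) : Decidable (Spec_make_char_n_gram target n out) := by unfold Spec_make_char_n_gram; infer_instance
def pvDiffWitness_make_char_n_gram : String × Int := ("ab", -1)
def pvDiffWitnessOut_make_char_n_gram : (List String) × (List String) := (["a", ""], ["", ""])

-- ===== CLAIM (what is proved, stated in full; the proofs are below) =====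
def Claim_unchanged_make_char_n_gram : Prop := ∀ (target : String) (n : Int), Dom_make_char_n_gram target n → Spec_make_char_n_gram target n (make_char_n_gram target n)
def Claim_changed_make_char_n_gram : Prop := Dom_make_char_n_gram (pvDiffWitness_make_char_n_gram.1) (pvDiffWitness_make_char_n_gram.2) ∧ D_make_char_n_gram (pvDiffWitness_make_char_n_gram.1) (pvDiffWitness_make_char_n_gram.2) ∧ make_char_n_gram (pvDiffWitness_make_char_n_gram.1) (pvDiffWitness_make_char_n_gram.2) = pvDiffWitnessOut_make_char_n_gram.1 ∧ make_char_n_gram_alt (pvDiffWitness_make_char_n_gram.1) (pvDiffWitness_make_char_n_gram.2) = pvDiffWitnessOut_make_char_n_gram.2 ∧ pvDiffWitnessOut_make_char_n_gram.1 ≠ pvDiffWitnessOut_make_char_n_gram.2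
def Claim_exact_make_char_n_gram : Prop := ∀ (target : String) (n : Int), Dom_make_char_n_gram target n → D_make_char_n_gram target n → make_char_n_gram target n ≠ make_char_n_gram_alt target n

-- ===== LEMMAS AND PROOFS =====

-- A's per-index word, named for the proofs
def pvAword (cs : List Char) (n : Int) (k : Nat) : List Char :=
  let w := PySem.List.slice cs (some (k : Int)) (some ((k : Int) + n))
  if (w.length : Int) < n then w ++ List.replicate (n - (w.length : Int)).toNat ' ' else w

-- A is the map of pvAword over the index range
theorem pvA_eq_map (target : String) (n : Int) :
    make_char_n_gram target n
      = (List.range target.toList.length).map (fun k => String.ofList (pvAword target.toList n k)) := by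
  unfold make_char_n_gram
  rw [PySem.List.foldl_append_singleton_eq_map]
  simp only [List.nil_append, PySem.Str.len_eq, PySem.List.pyRange_one, Int.sub_zero,
    Int.toNat_natCast, List.map_map]
  refine List.map_congr_left (fun k hk => ?_)
  simp [pvAword]

-- n ≤ 0 without wraparound: A's slice is empty
theorem pv_slice_empty (cs : List Char) (n : Int) (k : Nat) (hn : n ≤ 0)
    (hlen : (cs.length : Int) ≤ -n ∨ n = 0) :
    PySem.List.slice cs (some (k : Int)) (some ((k : Int) + n)) = [] := by
  apply List.eq_nil_of_length_eq_zero
  rw [PySem.List.length_slice, PySem.List.clampIdx_natCast]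
  by_cases hkn : 0 ≤ (k : Int) + n
  · obtain ⟨j, hj⟩ := Int.eq_ofNat_of_zero_le hkn
    rw [hj, PySem.List.clampIdx_natCast]
    omega
  · push Not at hkn
    have hj : ((k : Int) + n) = -(((-(k + n)).toNat : Nat) : Int) := by omega
    rw [hj, PySem.List.clampIdx_neg_natCast _ _ (by omega)]
    omega

-- n ≤ 0 without wraparound: the whole word is empty (padding never fires)
theorem pv_word_empty (cs : List Char) (n : Int) (k : Nat) (hn : n ≤ 0)
    (hlen : (cs.length : Int) ≤ -n ∨ n = 0) :
    pvAword cs n k = [] := by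
  unfold pvAword
  rw [pv_slice_empty cs n k hn hlen]
  have : ¬ ((0 : Int) < n) := by omega
  simp [this]

-- n = m'+1 > 0: A's conditionally padded slice IS the (m'+1)-window of the padded list
theorem pv_word_eq (cs : List Char) (k : Nat) (m' : Nat) (hk : k < cs.length) :
    pvAword cs ((m' + 1 : Nat) : Int) k
      = List.take (m' + 1) (List.drop k (cs ++ List.replicate m' ' ')) := by
  unfold pvAword
  rw [PySem.List.slice_natCast_add]
  have hdl : (cs.drop k).length = cs.length - k := by simp
  have hlen : ((cs.drop k).take (m' + 1)).length = min (m' + 1) (cs.length - k) := by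
    simp [List.length_take]
  rw [List.drop_append_of_le_length (by omega), List.take_append]
  by_cases hc : cs.length - k < m' + 1
  · have htest : (((cs.drop k).take (m' + 1)).length : Int) < ((m' + 1 : Nat) : Int) := by
      rw [hlen]; omega
    rw [if_pos htest, hlen]
    have htk : (cs.drop k).take (m' + 1) = cs.drop k := List.take_of_length_le (by omega)
    rw [htk, List.take_replicate]
    congr 2
    omega
  · push Not at hc
    have htest : ¬ (((cs.drop k).take (m' + 1)).length : Int) < ((m' + 1 : Nat) : Int) := by
      rw [hlen]; omega
    rw [if_neg htest]
    have h0 : m' + 1 - (cs.drop k).length = 0 := by omega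
    rw [h0, List.take_zero, List.append_nil]

-- the B loop invariant: window is the m'-prefix of the padded rest, grams accumulate reversed
theorem pvB_loop (m' : Nat) (cs : List Char) (gs0 : List String) :
    cs.reverse.foldl
      (fun (st : List Char × List String) ch =>
        let gram := ch :: st.1
        (gram.dropLast, st.2 ++ [String.ofList gram]))
      (List.replicate m' ' ', gs0)
    = (List.take m' (cs ++ List.replicate m' ' '),
       gs0 ++ ((List.range cs.length).map
         (fun i => String.ofList (List.take (m' + 1) (List.drop i (cs ++ List.replicate m' ' '))))).reverse) := by
  induction cs generalizing gs0 with
  | nil => simp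
  | cons c cs ih =>
    rw [List.reverse_cons, List.foldl_append, ih gs0]
    simp only [List.foldl_cons, List.foldl_nil]
    have hgram : c :: List.take m' (cs ++ List.replicate m' ' ')
        = List.take (m' + 1) ((c :: cs) ++ List.replicate m' ' ') := by
      rw [List.cons_append, List.take_succ_cons]
    rw [Prod.mk.injEq]
    constructor
    · -- new window
      rw [hgram, List.dropLast_eq_take, List.length_take]
      have hL : m' + 1 ≤ ((c :: cs) ++ List.replicate m' ' ').length := by
        simp
      rw [min_eq_left hL, List.take_take]
      simp
    · -- new grams
      rw [hgram, show (c :: cs).length = cs.length + 1 from rfl, List.range_succ_eq_map]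
      simp only [List.map_cons, List.map_map, List.reverse_cons, List.append_assoc]
      have hmap : (List.range cs.length).map
            ((fun i => String.ofList (List.take (m' + 1) (List.drop i ((c :: cs) ++ List.replicate m' ' ')))) ∘ Nat.succ)
          = (List.range cs.length).map
            (fun i => String.ofList (List.take (m' + 1) (List.drop i (cs ++ List.replicate m' ' ')))) := by
        refine List.map_congr_left (fun i hi => ?_)
        simp
      rw [hmap, List.drop_zero]

-- B for positive n, as a map over indices of windows of the padded list
theorem pvB_pos (target : String) (m' : Nat) :
    make_char_n_gram_alt target ((m' + 1 : Nat) : Int)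
      = (List.range target.toList.length).map
          (fun i => String.ofList (List.take (m' + 1) (List.drop i (target.toList ++ List.replicate m' ' ')))) := by
  unfold make_char_n_gram_alt
  rw [if_neg (by omega)]
  have h1 : (((m' + 1 : Nat) : Int) - 1).toNat = m' := by omega
  rw [h1, pvB_loop m' target.toList []]
  simp

-- ===== VERDICT (by name: the statement is the Claim_ definition above) =====
theorem make_char_n_gram_spec : Claim_unchanged_make_char_n_gram := by
  intro target n _ hD
  rw [pvA_eq_map]
  by_cases hn : n ≤ 0
  · -- all-empty case
    have hcase : (target.toList.length : Int) ≤ -n ∨ n = 0 := by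
      unfold D_make_char_n_gram at hD
      by_cases h0 : n = 0
      · right; exact h0
      · left
        by_contra hc
        exact hD ⟨by omega, by omega⟩
    unfold make_char_n_gram_alt
    rw [if_pos hn, List.eq_replicate_iff]
    refine ⟨by simp, ?_⟩
    intro s hs
    rw [List.mem_map] at hs
    obtain ⟨k, _, rfl⟩ := hs
    rw [pv_word_empty target.toList n k hn hcase]
  · push Not at hn
    obtain ⟨m', hm'⟩ : ∃ m' : Nat, n = ((m' + 1 : Nat) : Int) :=
      ⟨(n - 1).toNat, by omega⟩
    subst hm'
    rw [pvB_pos target m']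
    refine List.map_congr_left (fun k hk => ?_)
    rw [List.mem_range] at hk
    rw [pv_word_eq target.toList k m' hk]

theorem make_char_n_gram_changed : Claim_changed_make_char_n_gram := by
  unfold Claim_changed_make_char_n_gram; decide

theorem make_char_n_gram_tight : Claim_exact_make_char_n_gram := by
  intro target n _ hD h
  obtain ⟨hn, hlen⟩ := hD
  obtain ⟨j, rfl⟩ : ∃ j : Nat, n = -(j : Int) := ⟨(-n).toNat, by omega⟩
  have hj : 0 < j := by omega
  have hjlen : j < target.toList.length := by omega
  have hpos : 0 < target.toList.length := by omega
  -- compare the first grams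
  have h0 := congrArg (fun l => l[0]?) h
  rw [pvA_eq_map] at h0
  unfold make_char_n_gram_alt at h0
  rw [if_pos (by omega)] at h0
  simp only [List.getElem?_map, List.getElem?_range hpos, List.getElem?_replicate,
    if_pos hpos, Option.map_some] at h0
  -- A's first word is the nonempty wraparound slice target[:n]
  have hw : pvAword target.toList (-(j : Int)) 0 = target.toList.take (target.toList.length - j) := by
    simp only [pvAword, Nat.cast_zero, zero_add]
    rw [PySem.List.slice_zero_start, PySem.List.slice_to_neg_natCast _ _ hj]
    have hll : (target.toList.take (target.toList.length - j)).length
        = target.toList.length - j := by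
      rw [List.length_take]; omega
    rw [if_neg (by rw [hll]; omega)]
  rw [hw] at h0
  have hempty : target.toList.take (target.toList.length - j) = [] := by
    have h1 := Option.some.inj h0
    have h2 := congrArg String.toList h1
    simpa using h2
  have hlz : (target.toList.take (target.toList.length - j)).length = 0 := by
    rw [hempty]; rfl
  rw [List.length_take] at hlz
  omega
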